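-- pv_equiv track=rewrite | github.com/Hyojeong721/TIL | SWA/0812/nyl2353/1979_어디에단어가/s1.py | get_num_fitted_words
-- ===== SOURCE A (Python) =====
-- def get_num_fitted_words(puzzle, N, K):
--     """
--     N * N 크기의 단어 퍼즐에서, 딱 K 길이만큼 빈 칸의 개수를 세는 함수
--     puzzle: N * N 단어 퍼즐
--     N: 퍼즐의 한 변 크기
--     K: 원하는 빈 칸 크기
--
--     """
--     # 딱 맞는 빈 칸 카운팅
--     cnt = 0
--
--     for r in range(N):
--         # 가로방향, 세로방향 빈 칸 길이 측정 값
--         r_white = 0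
--         c_white = 0
--         for c in range(N):
--             # 1. 가로 방향 탐색
--             # 흰 칸이면 측정 길이 + 1
--             if puzzle[r][c]:
--                 r_white += 1
--             # 검은 칸이면 조건 체크한 후, 길이 0으로 초기화
--             else:
--                 # 앞까지의 흰칸이 K개면 카운트 +1
--                 if r_white == K:
--                     cnt += 1
--                 r_white = 0
--
--             # 2. 세로 방향 탐색
--             if puzzle[c][r]:
--                 c_white += 1
--             else:
--                 if c_white == K:
--                     cnt += 1
--                 c_white = 0
--
--         # 1-1. 가로 방향 흰 칸으로 끝난 경우 확인
--         if r_white == K: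
--             cnt += 1
--
--         # 2-1. 세로 방향 흰 칸으로 끝난 경우 확인
--         if c_white == K:
--             cnt += 1
--
--     return cnt
-- ===== SOURCE B (Python) =====
-- def get_num_fitted_words(puzzle, N, K):
--     # Gap arithmetic on black-cell positions: a white run of exactly K cells is a
--     # pair of consecutive black positions (with virtual blacks at -1 and N) at distance K+1.
--     def count_line(line):
--         blacks = [-1] + [i for i, v in enumerate(line) if not v] + [len(line)]
--         return sum(1 for a, b in zip(blacks, blacks[1:]) if b - a - 1 == K)
--     total = 0
--     for r in range(N):
--         total += count_line([puzzle[r][c] for c in range(N)])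
--         total += count_line([puzzle[c][r] for c in range(N)])
--     return total
-- ===== Notes on version B (the rewrite author's own statement) =====
-- stated objective: alternative
-- what changed: Replaces A's streaming run-length counters with per-row boundary checks by index arithmetic: per line it collects the positions of black cells (with virtual blacks at -1 and N) and counts consecutive-position pairs at distance K+1.
import Mathlib
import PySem

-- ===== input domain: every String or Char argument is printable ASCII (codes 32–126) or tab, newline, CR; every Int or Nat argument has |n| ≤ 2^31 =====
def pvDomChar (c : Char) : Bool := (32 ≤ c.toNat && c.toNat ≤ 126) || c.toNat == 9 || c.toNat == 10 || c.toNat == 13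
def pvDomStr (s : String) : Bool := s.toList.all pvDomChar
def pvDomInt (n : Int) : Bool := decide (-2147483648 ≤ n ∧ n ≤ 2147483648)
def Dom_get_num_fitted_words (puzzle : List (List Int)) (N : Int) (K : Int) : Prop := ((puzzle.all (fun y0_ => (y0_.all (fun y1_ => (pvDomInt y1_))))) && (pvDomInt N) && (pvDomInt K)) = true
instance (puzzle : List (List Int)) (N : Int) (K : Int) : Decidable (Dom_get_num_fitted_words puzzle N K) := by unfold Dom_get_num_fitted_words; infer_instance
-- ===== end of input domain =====

-- B replaces A's interleaved streaming run-length counters (with end-of-row checks) by index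
-- arithmetic: it collects black-cell positions per line (virtual blacks at -1 and N) and counts
-- consecutive pairs at distance K+1 — an alternative algorithm of the same cost.


-- ===== PORT A =====
-- body of A's inner loop over c: state (cnt, r_white, c_white); fr c = puzzle[r][c], fc c = puzzle[c][r]
def pvStepA (K : Int) (fr fc : Int → Int) (st : Int × Int × Int) (c : Int) : Int × Int × Int :=
  let s1 := if fr c ≠ 0 then (st.1, st.2.1 + 1) else (if st.2.1 = K then st.1 + 1 else st.1, 0)
  let s2 := if fc c ≠ 0 then (s1.1, st.2.2 + 1) else (if st.2.2 = K then s1.1 + 1 else s1.1, 0)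
  (s2.1, s1.2, s2.2)

def get_num_fitted_words (puzzle : List (List Int)) (N : Int) (K : Int) : Int :=
  (PySem.List.pyRange 0 N 1).foldl (fun cnt r =>
    let s := (PySem.List.pyRange 0 N 1).foldl
      (pvStepA K (fun c => PySem.List.pyGetD (PySem.List.pyGetD puzzle r []) c 0)
                 (fun c => PySem.List.pyGetD (PySem.List.pyGetD puzzle c []) r 0)) (cnt, 0, 0)
    let cnt1 := if s.2.1 = K then s.1 + 1 else s.1
    if s.2.2 = K then cnt1 + 1 else cnt1) 0

-- ===== PORT B =====
-- '[i for i, v in enumerate(line) if not v]': indices of the black (zero) cells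
def pvZeroIdx (i : Int) : List Int → List Int
  | [] => []
  | v :: l => if v = 0 then i :: pvZeroIdx (i + 1) l else pvZeroIdx (i + 1) l

-- B's count_line: blacks with virtual ends, then count adjacent pairs at distance K+1
def pvCountLineB (K : Int) (line : List Int) : Int :=
  let blacks : List Int := -1 :: (pvZeroIdx 0 line ++ [(line.length : Int)])
  (blacks.zip blacks.tail).foldl (fun c p => if p.2 - p.1 - 1 = K then c + 1 else c) 0

def get_num_fitted_words_alt (puzzle : List (List Int)) (N : Int) (K : Int) : Int :=
  (PySem.List.pyRange 0 N 1).foldl (fun total r =>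
    total
      + pvCountLineB K ((PySem.List.pyRange 0 N 1).map
          (fun c => PySem.List.pyGetD (PySem.List.pyGetD puzzle r []) c 0))
      + pvCountLineB K ((PySem.List.pyRange 0 N 1).map
          (fun c => PySem.List.pyGetD (PySem.List.pyGetD puzzle c []) r 0))) 0

-- ===== PRECONDITION & SPEC =====
-- Pre_ excludes exactly the inputs where Python A raises IndexError: N exceeding the number of
-- rows, or one of the first N rows shorter than N (both programs index puzzle[r][c] for r,c < N).
def Pre_get_num_fitted_words (puzzle : List (List Int)) (N : Int) (K : Int) : Prop :=
  N ≤ (puzzle.length : Int) ∧ ∀ row ∈ puzzle.take N.toNat, N ≤ (row.length : Int)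
instance (puzzle : List (List Int)) (N : Int) (K : Int) : Decidable (Pre_get_num_fitted_words puzzle N K) := by unfold Pre_get_num_fitted_words; infer_instance
def pvWitness_get_num_fitted_words : List (List Int) × Int × Int := ([[1, 1], [0, 1]], 2, 2)

def Spec_get_num_fitted_words (puzzle : List (List Int)) (N : Int) (K : Int) (out : Int) : Prop := out = get_num_fitted_words_alt puzzle N K
instance (puzzle : List (List Int)) (N : Int) (K : Int) (out : Int) : Decidable (Spec_get_num_fitted_words puzzle N K out) := by unfold Spec_get_num_fitted_words; infer_instance

-- ===== CLAIM (what is proved, stated in full; the proofs are below) =====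
def Claim_equal_get_num_fitted_words : Prop := ∀ (puzzle : List (List Int)) (N : Int) (K : Int), Dom_get_num_fitted_words puzzle N K → Pre_get_num_fitted_words puzzle N K → Spec_get_num_fitted_words puzzle N K (get_num_fitted_words puzzle N K)

-- ===== LEMMAS AND PROOFS =====

-- proof-side model of A's per-line streaming scan (state = (cnt, run))
def pvScan (K : Int) (line : List Int) (st : Int × Int) : Int × Int :=
  line.foldl (fun (s : Int × Int) v =>
    if v ≠ 0 then (s.1, s.2 + 1) else (if s.2 = K then s.1 + 1 else s.1, 0)) st

-- proof-side gap counter over a list of black positions between prev and last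
def pvGaps (K : Int) (prev : Int) : List Int → Int → Int
  | [], last => if last - prev - 1 = K then 1 else 0
  | b :: bs, last => (if b - prev - 1 = K then 1 else 0) + pvGaps K b bs last

lemma pvScan_cons (K v : Int) (l : List Int) (c run : Int) :
    pvScan K (v :: l) (c, run)
      = pvScan K l (if v ≠ 0 then (c, run + 1) else (if run = K then c + 1 else c, 0)) := rfl

-- the count component of a scan is additive in its starting count; the run component ignores it
lemma pvScan_shift (K : Int) (line : List Int) :
    ∀ (c run : Int), pvScan K line (c, run)
      = ((pvScan K line (0, run)).1 + c, (pvScan K line (0, run)).2) := by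
  induction line with
  | nil => intro c run; simp [pvScan]
  | cons v l ih =>
    intro c run
    rw [pvScan_cons, pvScan_cons]
    by_cases hv : v ≠ 0
    · rw [if_pos hv, if_pos hv]
      exact ih c (run + 1)
    · rw [if_neg hv, if_neg hv]
      by_cases hk : run = K
      · rw [if_pos hk, if_pos hk, ih (c + 1) 0, ih (0 + 1) 0]
        exact Prod.ext (by omega) rfl
      · rw [if_neg hk, if_neg hk]
        exact ih c 0

-- a fully evaluated cons step of the scan, count pulled out front
lemma pvScan_cons_eval (K v : Int) (l : List Int) (c run : Int) :
    pvScan K (v :: l) (c, run)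
      = if v ≠ 0 then ((pvScan K l (0, run + 1)).1 + c, (pvScan K l (0, run + 1)).2)
        else ((pvScan K l (0, 0)).1 + c + (if run = K then 1 else 0), (pvScan K l (0, 0)).2) := by
  rw [pvScan_cons]
  by_cases hv : v ≠ 0
  · rw [if_pos hv, if_pos hv, pvScan_shift]
  · rw [if_neg hv, if_neg hv]
    by_cases hk : run = K
    · rw [if_pos hk, if_pos hk, pvScan_shift]
      exact Prod.ext (by omega) rfl
    · rw [if_neg hk, if_neg hk, pvScan_shift]
      exact Prod.ext (by omega) rfl

-- A's interleaved inner loop splits into one row-line scan and one column-line scan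
lemma pv_inner_split (K : Int) (fr fc : Int → Int) (L : List Int) :
    ∀ (cnt rw cw : Int),
    L.foldl (pvStepA K fr fc) (cnt, rw, cw)
    = (cnt + (pvScan K (L.map fr) (0, rw)).1 + (pvScan K (L.map fc) (0, cw)).1,
       (pvScan K (L.map fr) (0, rw)).2, (pvScan K (L.map fc) (0, cw)).2) := by
  induction L with
  | nil => intro cnt rw cw; simp [pvScan]
  | cons c L ih =>
    intro cnt rw cw
    rw [List.foldl_cons, List.map_cons, List.map_cons, pvScan_cons_eval, pvScan_cons_eval]
    by_cases h1 : fr c ≠ 0 <;> by_cases h2 : fc c ≠ 0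
    · have hs : pvStepA K fr fc (cnt, rw, cw) c = (cnt, rw + 1, cw + 1) := by
        simp [pvStepA, h1, h2]
      rw [hs, ih, if_pos h1, if_pos h2]
      exact Prod.ext (by omega) rfl
    · have hs : pvStepA K fr fc (cnt, rw, cw) c
          = ((if cw = K then cnt + 1 else cnt), rw + 1, 0) := by
        simp [pvStepA, h1, h2]
      rw [hs, ih, if_pos h1, if_neg h2]
      refine Prod.ext ?_ rfl
      split_ifs <;> omega
    · have hs : pvStepA K fr fc (cnt, rw, cw) c
          = ((if rw = K then cnt + 1 else cnt), 0, cw + 1) := by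
        simp [pvStepA, h1, h2]
      rw [hs, ih, if_neg h1, if_pos h2]
      refine Prod.ext ?_ rfl
      split_ifs <;> omega
    · have hs : pvStepA K fr fc (cnt, rw, cw) c
          = ((if cw = K then (if rw = K then cnt + 1 else cnt) + 1 else (if rw = K then cnt + 1 else cnt)), 0, 0) := by
        simp [pvStepA, h1, h2]
      rw [hs, ih, if_neg h1, if_neg h2]
      refine Prod.ext ?_ rfl
      split_ifs <;> omega

-- the zip fold of B's count_line counts exactly the gaps between consecutive black positions
lemma pv_zip_gaps (K : Int) : ∀ (zs : List Int) (prev last c : Int),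
    (((prev :: (zs ++ [last])).zip (zs ++ [last])).foldl
        (fun c p => if p.2 - p.1 - 1 = K then c + 1 else c) c)
      = c + pvGaps K prev zs last := by
  intro zs
  induction zs with
  | nil =>
    intro prev last c
    show (if last - prev - 1 = K then c + 1 else c) = c + (if last - prev - 1 = K then 1 else 0)
    split_ifs <;> omega
  | cons b bs ih =>
    intro prev last c
    show (((b :: (bs ++ [last])).zip (bs ++ [last])).foldl _
        (if b - prev - 1 = K then c + 1 else c)) = _
    rw [ih b last]
    show _ = c + ((if b - prev - 1 = K then 1 else 0) + pvGaps K b bs last)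
    split_ifs <;> omega

-- the gap count from black positions equals the streaming scan with its final run == K check
lemma pv_gaps_scan (K : Int) : ∀ (line : List Int) (i run cnt : Int),
    cnt + pvGaps K (i - run - 1) (pvZeroIdx i line) (i + (line.length : Int))
      = (if (pvScan K line (cnt, run)).2 = K then (pvScan K line (cnt, run)).1 + 1
         else (pvScan K line (cnt, run)).1) := by
  intro line
  induction line with
  | nil =>
    intro i run cnt
    simp only [pvZeroIdx, pvGaps, pvScan, List.foldl_nil, List.length_nil]
    split_ifs <;> omega
  | cons v l ih =>
    intro i run cnt
    have hlen : i + (((v :: l).length : Int)) = (i + 1) + ((l.length : Int)) := by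
      have h : (v :: l).length = l.length + 1 := rfl
      rw [h]; push_cast; ring
    rw [pvScan_cons, hlen]
    by_cases hv : v ≠ 0
    · have hz : pvZeroIdx i (v :: l) = pvZeroIdx (i + 1) l := by
        simp [pvZeroIdx, hv]
      rw [hz, if_pos hv]
      have := ih (i + 1) (run + 1) cnt
      have harg : i + 1 - (run + 1) - 1 = i - run - 1 := by omega
      rw [harg] at this
      exact this
    · have hv0 : v = 0 := by omega
      have hz : pvZeroIdx i (v :: l) = i :: pvZeroIdx (i + 1) l := by
        simp [pvZeroIdx, hv0]
      rw [hz, if_neg hv]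
      show cnt + ((if i - (i - run - 1) - 1 = K then 1 else 0) + pvGaps K i (pvZeroIdx (i + 1) l) _) = _
      have harg : i - (i - run - 1) - 1 = run := by omega
      rw [harg]
      have := ih (i + 1) 0 (if run = K then cnt + 1 else cnt)
      have harg2 : i + 1 - 0 - 1 = i := by omega
      rw [harg2] at this
      by_cases hk : run = K
      · simp only [if_pos hk] at this ⊢
        omega
      · simp only [if_neg hk] at this ⊢
        omega

-- B's count_line in terms of the streaming scan
lemma pvCountLineB_eq_scan (K : Int) (line : List Int) :
    pvCountLineB K line
      = (if (pvScan K line ((0:Int), 0)).2 = K then (pvScan K line ((0:Int), 0)).1 + 1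
         else (pvScan K line ((0:Int), 0)).1) := by
  unfold pvCountLineB
  show (((-1 :: (pvZeroIdx 0 line ++ [(line.length : Int)])).zip
          (pvZeroIdx 0 line ++ [(line.length : Int)])).foldl _ 0) = _
  rw [pv_zip_gaps K (pvZeroIdx 0 line) (-1) (line.length : Int) 0]
  have h := pv_gaps_scan K line 0 0 0
  have harg : (0 : Int) - 0 - 1 = -1 := by omega
  rw [harg] at h
  simpa using h

-- one iteration of A's outer loop adds the row-line gap count and the column-line gap count
lemma pv_body (K : Int) (fr fc : Int → Int) (R : List Int) (cnt : Int) :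
    (let s := R.foldl (pvStepA K fr fc) (cnt, 0, 0)
     let cnt1 := if s.2.1 = K then s.1 + 1 else s.1
     if s.2.2 = K then cnt1 + 1 else cnt1)
    = cnt + pvCountLineB K (R.map fr) + pvCountLineB K (R.map fc) := by
  simp only [pv_inner_split, pvCountLineB_eq_scan]
  split_ifs <;> omega

theorem pv_main (puzzle : List (List Int)) (N : Int) (K : Int) :
    get_num_fitted_words puzzle N K = get_num_fitted_words_alt puzzle N K := by
  unfold get_num_fitted_words get_num_fitted_words_alt
  congr 1
  funext cnt r
  exact pv_body K _ _ _ cnt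

-- ===== VERDICT (by name: the statement is the Claim_ definition above) =====
theorem get_num_fitted_words_spec : Claim_equal_get_num_fitted_words := by
  intro puzzle N K _ _
  unfold Spec_get_num_fitted_words
  exact pv_main puzzle N K
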